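-- pv_equiv track=rewrite | github.com/tehZevo/agent-dashboard | dashboard.py | calculate_team_status
-- ===== SOURCE A (Python) =====
-- def calculate_team_status(agents):
--     """
--     Calculate overall team status based on individual agent statuses
--     Priority: error > warning > working > idle > stale
--     """
--     if not agents:
--         return {"status": "empty", "color": "gray", "label": "Empty"}
--
--     statuses = [agent["display_status"] for agent in agents]
--
--     # Priority order
--     if "error" in statuses:
--         return {"status": "error", "color": "red", "label": "Error"}
--     elif "warning" in statuses:
--         return {"status": "warning", "color": "yellow", "label": "Warning"}
--     elif "working" in statuses:
--         return {"status": "working", "color": "green", "label": "Working"}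
--     elif "idle" in statuses:
--         return {"status": "idle", "color": "blue", "label": "Idle"}
--     elif "stale" in statuses:
--         return {"status": "stale", "color": "gray", "label": "Stale"}
--     else:
--         return {"status": "unknown", "color": "gray", "label": "Unknown"}
-- ===== SOURCE B (Python) =====
-- RANKS = {"error": 0, "warning": 1, "working": 2, "idle": 3, "stale": 4}
--
-- RESULTS = [
--     {"status": "error", "color": "red", "label": "Error"},
--     {"status": "warning", "color": "yellow", "label": "Warning"},
--     {"status": "working", "color": "green", "label": "Working"},
--     {"status": "idle", "color": "blue", "label": "Idle"},
--     {"status": "stale", "color": "gray", "label": "Stale"},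
--     {"status": "unknown", "color": "gray", "label": "Unknown"},
-- ]
--
-- def calculate_team_status(agents):
--     """Single pass keeping the best (lowest) priority rank seen so far."""
--     best = 5
--     for agent in agents:
--         best = min(best, RANKS.get(agent["display_status"], 5))
--     if not agents:
--         return {"status": "empty", "color": "gray", "label": "Empty"}
--     return RESULTS[best]
-- ===== Notes on version B (the rewrite author's own statement) =====
-- stated objective: simpler
-- what changed: Replaces building a status list and scanning it up to five times with a single pass over agents that keeps the minimum priority rank and indexes a fixed result table.
import Mathlib
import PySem

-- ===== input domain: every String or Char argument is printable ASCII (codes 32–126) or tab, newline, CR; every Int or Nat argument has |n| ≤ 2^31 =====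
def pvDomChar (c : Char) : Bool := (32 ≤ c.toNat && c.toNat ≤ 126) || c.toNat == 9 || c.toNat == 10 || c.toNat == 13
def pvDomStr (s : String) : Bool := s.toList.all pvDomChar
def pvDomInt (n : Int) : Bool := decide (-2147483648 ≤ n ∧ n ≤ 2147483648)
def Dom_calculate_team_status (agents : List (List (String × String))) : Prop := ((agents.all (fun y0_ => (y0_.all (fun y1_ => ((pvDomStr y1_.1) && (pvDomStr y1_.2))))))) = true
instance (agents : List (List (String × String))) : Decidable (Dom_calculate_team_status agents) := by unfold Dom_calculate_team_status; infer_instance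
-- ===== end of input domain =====

-- B replaces A's status-list build plus five membership scans by a single pass keeping the minimum priority rank (objective: simpler).


-- ===== PORT A =====
-- agent["display_status"]: first-match lookup in the insertion-ordered assoc list; under
-- Pre_ the key is present, so the `.getD ""` default is never taken (Python raises KeyError otherwise).
def pvDisp (agent : List (String × String)) : String :=
  (agent.lookup "display_status").getD ""

def calculate_team_status (agents : List (List (String × String))) : List (String × String) :=
  if agents.isEmpty then
    [("status", "empty"), ("color", "gray"), ("label", "Empty")]
  else
    let statuses := agents.map pvDisp
    if statuses.contains "error" then
      [("status", "error"), ("color", "red"), ("label", "Error")]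
    else if statuses.contains "warning" then
      [("status", "warning"), ("color", "yellow"), ("label", "Warning")]
    else if statuses.contains "working" then
      [("status", "working"), ("color", "green"), ("label", "Working")]
    else if statuses.contains "idle" then
      [("status", "idle"), ("color", "blue"), ("label", "Idle")]
    else if statuses.contains "stale" then
      [("status", "stale"), ("color", "gray"), ("label", "Stale")]
    else
      [("status", "unknown"), ("color", "gray"), ("label", "Unknown")]

-- ===== PORT B =====
-- RANKS.get(s, 5)
def pvRank (s : String) : Nat :=
  if s == "error" then 0
  else if s == "warning" then 1
  else if s == "working" then 2
  else if s == "idle" then 3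
  else if s == "stale" then 4
  else 5

-- the RESULTS table
def pvResults : List (List (String × String)) :=
  [ [("status", "error"), ("color", "red"), ("label", "Error")],
    [("status", "warning"), ("color", "yellow"), ("label", "Warning")],
    [("status", "working"), ("color", "green"), ("label", "Working")],
    [("status", "idle"), ("color", "blue"), ("label", "Idle")],
    [("status", "stale"), ("color", "gray"), ("label", "Stale")],
    [("status", "unknown"), ("color", "gray"), ("label", "Unknown")] ]

def calculate_team_status_alt (agents : List (List (String × String))) : List (String × String) :=
  let best := agents.foldl (fun b agent => min b (pvRank (pvDisp agent))) 5
  if agents.isEmpty then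
    [("status", "empty"), ("color", "gray"), ("label", "Empty")]
  else
    pvResults.getD best []

-- ===== PRECONDITION & SPEC =====
-- Pre_ excludes exactly the inputs where Python A raises KeyError: an agent without a "display_status" key.
def Pre_calculate_team_status (agents : List (List (String × String))) : Prop :=
  ∀ a ∈ agents, (a.lookup "display_status").isSome = true
instance (agents : List (List (String × String))) : Decidable (Pre_calculate_team_status agents) := by unfold Pre_calculate_team_status; infer_instance

def pvWitness_calculate_team_status : (List (List (String × String))) :=
  [[("display_status", "idle")], [("display_status", "working")]]

def Spec_calculate_team_status (agents : List (List (String × String))) (out : List (String × String)) : Prop := out = calculate_team_status_alt agents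
instance (agents : List (List (String × String))) (out : List (String × String)) : Decidable (Spec_calculate_team_status agents out) := by unfold Spec_calculate_team_status; infer_instance

-- ===== CLAIM (what is proved, stated in full; the proofs are below) =====
def Claim_equal_calculate_team_status : Prop := ∀ (agents : List (List (String × String))), Dom_calculate_team_status agents → Pre_calculate_team_status agents → Spec_calculate_team_status agents (calculate_team_status agents)

-- ===== LEMMAS AND PROOFS =====

-- the min rank of a list of statuses, structurally
def pvMinRank : List String → Nat
  | [] => 5
  | s :: l => min (pvRank s) (pvMinRank l)

theorem foldl_min_rank (agents : List (List (String × String))) (b : Nat) (hb : b ≤ 5) :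
    agents.foldl (fun b agent => min b (pvRank (pvDisp agent))) b
      = min b (pvMinRank (agents.map pvDisp)) := by
  induction agents generalizing b with
  | nil => simp only [List.foldl_nil, List.map_nil, pvMinRank]; omega
  | cons a l ih =>
      have hr : min b (pvRank (pvDisp a)) ≤ 5 := by omega
      simp only [List.foldl_cons, List.map_cons, pvMinRank, ih _ hr]
      omega

theorem minRank_le5 (l : List String) : pvMinRank l ≤ 5 := by
  induction l with
  | nil => simp [pvMinRank]
  | cons a l ih => exact le_trans (Nat.min_le_right _ _) ih

theorem minRank_le_of_contains (l : List String) (t : String) (h : l.contains t = true) :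
    pvMinRank l ≤ pvRank t := by
  induction l with
  | nil => simp at h
  | cons a l ih =>
      simp only [List.contains_cons, Bool.or_eq_true, beq_iff_eq] at h
      rcases h with h | h
      · subst h; exact Nat.min_le_left _ _
      · exact le_trans (Nat.min_le_right _ _) (ih h)

theorem minRank_ge (l : List String) (k : Nat) (hk : k ≤ 5)
    (h : ∀ s, l.contains s = true → k ≤ pvRank s) : k ≤ pvMinRank l := by
  induction l with
  | nil => simpa [pvMinRank] using hk
  | cons a l ih =>
      have ha := h a (by simp)
      have hrest : ∀ s, l.contains s = true → k ≤ pvRank s := fun s hs => h s (by simp; exact Or.inr (by simpa using hs))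
      exact le_min ha (ih hrest)

-- a status different from the first k priority names has rank ≥ k
theorem rank_ge_of_not_contains (l : List String) (s : String) (hs : l.contains s = true) :
    ∀ k : Nat, k ≤ 5 →
      (1 ≤ k → l.contains "error" = false) →
      (2 ≤ k → l.contains "warning" = false) →
      (3 ≤ k → l.contains "working" = false) →
      (4 ≤ k → l.contains "idle" = false) →
      (5 ≤ k → l.contains "stale" = false) →
      k ≤ pvRank s := by
  intro k hk h1 h2 h3 h4 h5
  have ne : ∀ t : String, l.contains t = false → s ≠ t := by
    intro t ht he; rw [he, ht] at hs; exact absurd hs (by simp)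
  by_cases k1 : 1 ≤ k
  · have n1 := ne _ (h1 k1)
    by_cases k2 : 2 ≤ k
    · have n2 := ne _ (h2 k2)
      by_cases k3 : 3 ≤ k
      · have n3 := ne _ (h3 k3)
        by_cases k4 : 4 ≤ k
        · have n4 := ne _ (h4 k4)
          by_cases k5 : 5 ≤ k
          · have n5 := ne _ (h5 k5)
            simp only [pvRank, beq_iff_eq, n1, n2, n3, n4, n5, if_false]
            omega
          · simp only [pvRank, beq_iff_eq, n1, n2, n3, n4, if_false]
            split_ifs <;> omega
        · simp only [pvRank, beq_iff_eq, n1, n2, n3, if_false]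
          split_ifs <;> omega
      · simp only [pvRank, beq_iff_eq, n1, n2, if_false]
        split_ifs <;> omega
    · simp only [pvRank, beq_iff_eq, n1, if_false]
      split_ifs <;> omega
  · omega

-- ===== VERDICT (by name: the statement is the Claim_ definition above) =====
theorem calculate_team_status_spec : Claim_equal_calculate_team_status := by
  intro agents _ _
  unfold Spec_calculate_team_status calculate_team_status calculate_team_status_alt
  by_cases he : agents.isEmpty
  · simp [he]
  · rw [foldl_min_rank agents 5 (by omega)]
    simp only [he, Bool.false_eq_true, if_false,
      Nat.min_eq_right (minRank_le5 (agents.map pvDisp))]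
    split_ifs with hE hW hK hI hS
    · have hub := minRank_le_of_contains _ _ hE
      have h0 : pvMinRank (agents.map pvDisp) = 0 := by
        rw [show pvRank "error" = 0 from by decide] at hub; omega
      rw [h0]; rfl
    · have hub := minRank_le_of_contains _ _ hW
      have hlb := minRank_ge _ 1 (by omega)
        (fun s hs => rank_ge_of_not_contains _ s hs 1 (by omega)
          (fun _ => Bool.eq_false_iff.mpr hE) (by omega) (by omega) (by omega) (by omega))
      have h1 : pvMinRank (agents.map pvDisp) = 1 := by
        rw [show pvRank "warning" = 1 from by decide] at hub; omega
      rw [h1]; rfl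
    · have hub := minRank_le_of_contains _ _ hK
      have hlb := minRank_ge _ 2 (by omega)
        (fun s hs => rank_ge_of_not_contains _ s hs 2 (by omega)
          (fun _ => Bool.eq_false_iff.mpr hE) (fun _ => Bool.eq_false_iff.mpr hW) (by omega) (by omega) (by omega))
      have h2 : pvMinRank (agents.map pvDisp) = 2 := by
        rw [show pvRank "working" = 2 from by decide] at hub; omega
      rw [h2]; rfl
    · have hub := minRank_le_of_contains _ _ hI
      have hlb := minRank_ge _ 3 (by omega)
        (fun s hs => rank_ge_of_not_contains _ s hs 3 (by omega)
          (fun _ => Bool.eq_false_iff.mpr hE) (fun _ => Bool.eq_false_iff.mpr hW) (fun _ => Bool.eq_false_iff.mpr hK) (by omega) (by omega))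
      have h3 : pvMinRank (agents.map pvDisp) = 3 := by
        rw [show pvRank "idle" = 3 from by decide] at hub; omega
      rw [h3]; rfl
    · have hub := minRank_le_of_contains _ _ hS
      have hlb := minRank_ge _ 4 (by omega)
        (fun s hs => rank_ge_of_not_contains _ s hs 4 (by omega)
          (fun _ => Bool.eq_false_iff.mpr hE) (fun _ => Bool.eq_false_iff.mpr hW) (fun _ => Bool.eq_false_iff.mpr hK) (fun _ => Bool.eq_false_iff.mpr hI) (by omega))
      have h4 : pvMinRank (agents.map pvDisp) = 4 := by
        rw [show pvRank "stale" = 4 from by decide] at hub; omega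
      rw [h4]; rfl
    · have hlb := minRank_ge _ 5 (by omega)
        (fun s hs => rank_ge_of_not_contains _ s hs 5 (by omega)
          (fun _ => Bool.eq_false_iff.mpr hE) (fun _ => Bool.eq_false_iff.mpr hW) (fun _ => Bool.eq_false_iff.mpr hK) (fun _ => Bool.eq_false_iff.mpr hI) (fun _ => Bool.eq_false_iff.mpr hS))
      have h5 : pvMinRank (agents.map pvDisp) = 5 :=
        le_antisymm (minRank_le5 _) hlb
      rw [h5]; rfl
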